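-- pv_equiv track=rewrite | github.com/230701222/UID-LAB | Ex 3/rename_file_vui.py | fix_speech_to_filename
-- ===== SOURCE A (Python) =====
-- def fix_speech_to_filename(words):
--     """
--     Converts a list of words from speech recognition into a valid filename.
--     - Replaces "dot" with "." only when it's between words.
--     """
--     corrected_words = []
--
--     for i in range(len(words)):
--         if words[i] == "dot" and i > 0 and i < len(words) - 1:
--             corrected_words.append(".")  # Convert "dot" to "."
--         else:
--             corrected_words.append(words[i])
--
--     return "".join(corrected_words)  # Join without spaces to form a filename
-- ===== SOURCE B (Python) =====
-- def fix_speech_to_filename(words):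
--     # Streaming lag-one pass: hold each word back one step, so a word is
--     # transformed only once we know it is neither the first nor the last.
--     if not words:
--         return ""
--     it = iter(words)
--     pieces = [next(it)]          # first word verbatim
--     pending = None
--     for w in it:
--         if pending is not None:
--             pieces.append("." if pending == "dot" else pending)
--         pending = w
--     if pending is not None:
--         pieces.append(pending)   # last word verbatim
--     return "".join(pieces)
-- ===== Notes on version B (the rewrite author's own statement) =====
-- stated objective: alternative
-- what changed: B is a streaming lag-one pass over an iterator: the first word is emitted verbatim, every subsequent word is buffered for one step and transformed only once a successor proves it is not the last, and the final buffered word is emitted verbatim - no indices, no len(), no per-index boundary test.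
import Mathlib
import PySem

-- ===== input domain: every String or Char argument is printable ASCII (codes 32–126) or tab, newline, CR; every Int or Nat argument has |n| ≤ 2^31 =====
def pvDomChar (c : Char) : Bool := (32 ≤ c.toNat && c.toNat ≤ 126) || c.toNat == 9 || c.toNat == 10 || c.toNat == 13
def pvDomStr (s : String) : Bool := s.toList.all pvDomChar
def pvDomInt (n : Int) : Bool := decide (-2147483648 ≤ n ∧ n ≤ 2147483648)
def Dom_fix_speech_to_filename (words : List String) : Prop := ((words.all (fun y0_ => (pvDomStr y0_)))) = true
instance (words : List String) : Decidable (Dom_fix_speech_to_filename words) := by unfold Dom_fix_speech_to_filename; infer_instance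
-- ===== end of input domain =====

-- B replaces A's per-index boundary test by a streaming lag-one pass: the first word is
-- emitted verbatim, each later word is buffered one step and transformed only once a
-- successor shows it is not last, and the buffered last word is emitted verbatim (alternative).

-- ===== PORT A =====
def fix_speech_to_filename (words : List String) : String :=
  let corrected :=
    (PySem.List.pyRange 0 (words.length : Int) 1).foldl
      (fun acc i =>
        if PySem.List.pyGetD words i "" = "dot" ∧ i > 0 ∧ i < (words.length : Int) - 1 then
          acc ++ ["."]
        else
          acc ++ [PySem.List.pyGetD words i ""]) []
  PySem.Str.join "" corrected

-- ===== PORT B =====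
def fix_speech_to_filename_alt (words : List String) : String :=
  match words with
  | [] => ""
  | w0 :: rest =>
    -- pieces = [first word]; pending = None; for w in it: …
    let st := rest.foldl
      (fun (st : List String × Option String) w =>
        match st.2 with
        | none => (st.1, some w)
        | some p => (st.1 ++ [if p = "dot" then "." else p], some w))
      ([w0], none)
    let pieces := match st.2 with
      | none => st.1
      | some p => st.1 ++ [p]
    PySem.Str.join "" pieces

-- ===== PRECONDITION & SPEC =====
def Spec_fix_speech_to_filename (words : List String) (out : String) : Prop := out = fix_speech_to_filename_alt words
instance (words : List String) (out : String) : Decidable (Spec_fix_speech_to_filename words out) := by unfold Spec_fix_speech_to_filename; infer_instance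

-- ===== CLAIM (what is proved, stated in full; the proofs are below) =====
def Claim_equal_fix_speech_to_filename : Prop := ∀ (words : List String), Dom_fix_speech_to_filename words → Spec_fix_speech_to_filename words (fix_speech_to_filename words)

-- ===== LEMMAS AND PROOFS =====

-- A's loop builds the list by appending one element per index: it is a map over the range.
theorem fix_corrected_eq_map (words : List String) :
    (PySem.List.pyRange 0 (words.length : Int) 1).foldl
      (fun acc i =>
        if PySem.List.pyGetD words i "" = "dot" ∧ i > 0 ∧ i < (words.length : Int) - 1 then
          acc ++ ["."]
        else
          acc ++ [PySem.List.pyGetD words i ""]) [] =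
    (PySem.List.pyRange 0 (words.length : Int) 1).map
      (fun i =>
        if PySem.List.pyGetD words i "" = "dot" ∧ i > 0 ∧ i < (words.length : Int) - 1 then
          "."
        else
          PySem.List.pyGetD words i "") := by
  have hbody :
      (fun (acc : List String) i =>
        if PySem.List.pyGetD words i "" = "dot" ∧ i > 0 ∧ i < (words.length : Int) - 1 then
          acc ++ ["."]
        else
          acc ++ [PySem.List.pyGetD words i ""]) =
      (fun acc i =>
        acc ++ [if PySem.List.pyGetD words i "" = "dot" ∧ i > 0 ∧ i < (words.length : Int) - 1 then
          "." else PySem.List.pyGetD words i ""]) := by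
    funext acc i
    split_ifs <;> rfl
  rw [hbody, PySem.List.foldl_append_singleton_eq_map]
  simp

-- B's lag-one fold, once the buffer is full, appends the transformed dropLast and buffers the last.
theorem fix_foldl_lag (l : List String) (acc : List String) (p : String) :
    l.foldl
      (fun (st : List String × Option String) w =>
        match st.2 with
        | none => (st.1, some w)
        | some p => (st.1 ++ [if p = "dot" then "." else p], some w))
      (acc, some p) =
    (acc ++ ((p :: l).dropLast.map (fun w => if w = "dot" then "." else w)), some (l.getLastD p)) := by
  induction l generalizing acc p with
  | nil => simp
  | cons x xs ih =>
    simp only [List.foldl_cons, ih]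
    cases xs <;> simp [List.getLastD]

theorem fix_getLastD_eq_getElem (l : List String) (d : String) :
    l.getLastD d = (d :: l)[l.length]'(by simp) := by
  cases l with
  | nil => rfl
  | cons x xs =>
    rw [List.getLastD_eq_getLast?, List.getLast?_eq_getElem?]
    simp
    rfl

theorem fix_speech_to_filename_spec : Claim_equal_fix_speech_to_filename := by
  intro words _
  unfold Spec_fix_speech_to_filename fix_speech_to_filename fix_speech_to_filename_alt
  simp only
  rw [fix_corrected_eq_map]
  match words with
  | [] => rfl
  | [w0] =>
    show _ = PySem.Str.join "" [w0]
    have hr : PySem.List.pyRange 0 (((1 : Nat) : Int)) 1 = [(0 : Int)] := by decide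
    congr 1
    simp only [List.length_cons, List.length_nil, hr, List.map_cons, List.map_nil]
    norm_num
  | w0 :: r0 :: rs =>
    simp only [List.foldl_cons]
    rw [fix_foldl_lag rs [w0] r0]
    simp only [List.cons_append, List.nil_append]
    congr 1
    apply List.ext_getElem
    · simp [PySem.List.length_pyRange_one]
      omega
    · intro k h1 h2
      have hklt : k < (w0 :: r0 :: rs).length := by
        simp [PySem.List.length_pyRange_one] at h1
        simp only [List.length_cons]
        omega
      rw [List.getElem_map, PySem.List.getElem_pyRange_one]
      have hgd : PySem.List.pyGetD (w0 :: r0 :: rs) (0 + (k : Int)) "" = (w0 :: r0 :: rs)[k] := by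
        rw [zero_add, PySem.List.pyGetD_natCast]
        simp [List.getD_eq_getElem?_getD, List.getElem?_eq_getElem hklt]
      rw [hgd]
      have hk2 : k < rs.length + 2 := by
        simp only [List.length_cons] at hklt
        omega
      by_cases hk0 : k = 0
      · subst hk0
        rw [if_neg (by rintro ⟨-, h, -⟩; omega)]
        simp
      by_cases hklast : k = rs.length + 1
      · subst hklast
        rw [if_neg (by rintro ⟨-, -, h⟩; simp only [List.length_cons] at h; omega)]
        simp only [List.getElem_cons_succ]
        rw [List.getElem_append_right (by simp)]
        simp only [List.length_map, List.length_dropLast, List.length_cons,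
          Nat.add_sub_cancel, Nat.sub_self, List.getElem_cons_zero]
        exact (fix_getLastD_eq_getElem rs r0).symm
      · obtain ⟨j, rfl⟩ : ∃ j, k = j + 1 := ⟨k - 1, by omega⟩
        have hj : j < rs.length := by omega
        rw [List.getElem_cons_succ, List.getElem_cons_succ]
        rw [List.getElem_append_left (by simpa using hj)]
        rw [List.getElem_map, List.getElem_dropLast]
        have hpos : 0 + ((j + 1 : Nat) : Int) > 0 := by push_cast; omega
        have hlt : 0 + ((j + 1 : Nat) : Int) < (((w0 :: r0 :: rs).length : Nat) : Int) - 1 := by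
          simp only [List.length_cons]
          push_cast
          omega
        by_cases hd : (r0 :: rs)[j]'(by simp only [List.length_cons]; omega) = "dot"
        · rw [if_pos ⟨hd, hpos, hlt⟩, if_pos hd]
        · rw [if_neg (by rintro ⟨h, -, -⟩; exact hd h), if_neg hd]
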